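-- pv_equiv track=rewrite | github.com/snuq/Tetrivium | gamescreen.py | get_piece_spacing
-- ===== SOURCE A (Python) =====
-- def get_piece_spacing(grid):
--     #iterate through a list and determine if each column contains any True
--     column_totals = []
--     width = len(grid[0])
--     height = len(grid)
--     for index_x in range(width):
--         trues = 0
--         for index_y in range(height):
--             if grid[index_y][index_x] is True:
--                 trues += 1
--         if trues > 0:
--             column_totals.append(True)
--         else:
--             column_totals.append(False)
--     space_l = 0
--     for column in column_totals:
--         if column is True:
--             break
--         space_l += 1
--     space_r = 0
--     for column in reversed(column_totals):
--         if column is True: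
--             break
--         space_r += 1
--     piece_width = width - space_l - space_r
--     return space_l, piece_width
-- ===== SOURCE B (Python) =====
-- def get_piece_spacing(grid):
--     # Single pass over the columns tracking min/max occupied column;
--     # sentinels (width, -1) reproduce the all-empty result with no special case.
--     width = len(grid[0])
--     min_col, max_col = width, -1
--     for x in range(width):
--         if any(row[x] is True for row in grid):
--             if x < min_col:
--                 min_col = x
--             max_col = x
--     return min_col, max_col - min_col + 1
-- ===== Notes on version B (the rewrite author's own statement) =====
-- stated objective: simpler
-- what changed: Replaces the intermediate column_totals list and the three separate loops (per-column True counting, left scan, reversed right scan) by one short-circuiting pass over the columns that tracks the min and max occupied column with sentinels width/-1, returning (min_col, max_col - min_col + 1) directly.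
import Mathlib
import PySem

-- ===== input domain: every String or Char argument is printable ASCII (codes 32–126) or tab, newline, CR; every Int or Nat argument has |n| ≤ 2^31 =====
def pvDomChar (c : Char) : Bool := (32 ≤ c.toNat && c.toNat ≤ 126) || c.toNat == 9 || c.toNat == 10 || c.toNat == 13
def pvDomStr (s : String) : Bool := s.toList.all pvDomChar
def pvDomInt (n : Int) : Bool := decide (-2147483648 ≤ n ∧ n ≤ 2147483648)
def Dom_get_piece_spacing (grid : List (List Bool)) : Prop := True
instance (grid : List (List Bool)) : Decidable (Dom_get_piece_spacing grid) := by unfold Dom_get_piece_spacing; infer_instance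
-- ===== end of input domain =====

-- B replaces A's column_totals list and three loops by one min/max pass over the columns (objective: simpler; a timing run measured it faster by a constant factor: any() short-circuits and no column_totals list is built).


-- ===== PORT A =====
-- A-side helper: the 'for column in …: if column is True: break; space += 1' loop
def pvLeadFalse : List Bool → Int
  | [] => 0
  | b :: rest => if b then 0 else pvLeadFalse rest + 1

def get_piece_spacing (grid : List (List Bool)) : Int × Int :=
  let width : Int := ((PySem.List.pyGetD grid 0 []).length : Int)
  let height : Int := (grid.length : Int)
  let column_totals : List Bool :=
    (PySem.List.pyRange 0 width 1).foldl (fun acc ix =>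
      let trues : Int :=
        (PySem.List.pyRange 0 height 1).foldl (fun t iy =>
          if PySem.List.pyGetD (PySem.List.pyGetD grid iy []) ix false then t + 1 else t) 0
      if trues > 0 then acc ++ [true] else acc ++ [false]) []
  let space_l : Int := pvLeadFalse column_totals
  let space_r : Int := pvLeadFalse column_totals.reverse
  let piece_width : Int := width - space_l - space_r
  (space_l, piece_width)

-- ===== PORT B =====
def get_piece_spacing_alt (grid : List (List Bool)) : Int × Int :=
  let width : Int := ((PySem.List.pyGetD grid 0 []).length : Int)
  let p : Int × Int :=
    (PySem.List.pyRange 0 width 1).foldl (fun st x =>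
      if grid.any (fun row => PySem.List.pyGetD row x false) then
        (if x < st.1 then x else st.1, x)
      else st) (width, -1)
  (p.1, p.2 - p.1 + 1)

-- ===== PRECONDITION & SPEC =====
-- A raises IndexError on the empty grid (grid[0]) and on a ragged grid whose later row is
-- shorter than row 0 (grid[y][x] with x < len(grid[0])); Pre_ excludes exactly those inputs.
def Pre_get_piece_spacing (grid : List (List Bool)) : Prop :=
  grid ≠ [] ∧ ∀ row ∈ grid, (PySem.List.pyGetD grid 0 []).length ≤ row.length
instance (grid : List (List Bool)) : Decidable (Pre_get_piece_spacing grid) := by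
  unfold Pre_get_piece_spacing; infer_instance

def pvWitness_get_piece_spacing : List (List Bool) := [[false, true], [true, false]]

def Spec_get_piece_spacing (grid : List (List Bool)) (out : Int × Int) : Prop := out = get_piece_spacing_alt grid
instance (grid : List (List Bool)) (out : Int × Int) : Decidable (Spec_get_piece_spacing grid out) := by unfold Spec_get_piece_spacing; infer_instance

-- ===== CLAIM (what is proved, stated in full; the proofs are below) =====
def Claim_equal_get_piece_spacing : Prop := ∀ (grid : List (List Bool)), Dom_get_piece_spacing grid → Pre_get_piece_spacing grid → Spec_get_piece_spacing grid (get_piece_spacing grid)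

-- ===== LEMMAS AND PROOFS =====

-- B's loop as a structural recursion over the list of per-column occupancy bits, carrying the index.
def pvGoB : List Bool → Int → Int × Int → Int × Int
  | [], _, st => st
  | b :: r, i, st => pvGoB r (i + 1) (if b then (if i < st.1 then i else st.1, i) else st)

-- index of the last true, counted from the left (meaningful only when bs has a true)
def pvLastT (bs : List Bool) : Int := (bs.length : Int) - 1 - pvLeadFalse bs.reverse

theorem pvLeadFalse_nonneg : ∀ (bs : List Bool), 0 ≤ pvLeadFalse bs := by
  intro bs
  induction bs with
  | nil => simp [pvLeadFalse]
  | cons b r ih => cases b <;> simp [pvLeadFalse] <;> omega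

theorem pvLeadFalse_all_false : ∀ (bs : List Bool), bs.any id = false → pvLeadFalse bs = bs.length := by
  intro bs h
  induction bs with
  | nil => rfl
  | cons b r ih =>
    simp only [List.any_cons, Bool.or_eq_false_iff, id] at h
    cases b with
    | true => exact absurd h.1 (by simp)
    | false =>
      simp only [pvLeadFalse, Bool.false_eq_true, if_false, List.length_cons, ih h.2]
      push_cast; ring

theorem pvLeadFalse_append (xs ys : List Bool) :
    pvLeadFalse (xs ++ ys) = if xs.any id then pvLeadFalse xs else (xs.length : Int) + pvLeadFalse ys := by
  induction xs with
  | nil => simp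
  | cons b r ih =>
    cases b with
    | true => simp [pvLeadFalse]
    | false =>
      simp only [List.cons_append, pvLeadFalse, Bool.false_eq_true, if_false, ih,
        List.any_cons, id, Bool.false_or, List.length_cons]
      by_cases hr : r.any id = true
      · simp [hr]
      · simp only [hr]
        push_cast; ring

theorem pvGoB_after : ∀ (bs : List Bool) (i0 mn mx : Int), mn ≤ i0 →
    pvGoB bs i0 (mn, mx) = (mn, if bs.any id then i0 + pvLastT bs else mx) := by
  intro bs
  induction bs with
  | nil => intro i0 mn mx h; simp [pvGoB]
  | cons b r ih =>
    intro i0 mn mx h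
    cases b with
    | true =>
      have hni : ¬ i0 < mn := by omega
      simp only [pvGoB, if_true, hni, if_false]
      rw [ih (i0 + 1) mn i0 (by omega)]
      simp only [List.any_cons, id, Bool.true_or, if_true, pvLastT, List.reverse_cons,
        pvLeadFalse_append, List.length_cons, List.length_reverse, List.any_reverse]
      by_cases hr : r.any id = true
      · simp only [hr, if_true]
        congr 1
        push_cast; ring
      · have h2 := pvLeadFalse_all_false r.reverse (by simpa using hr)
        simp only [hr, h2, List.length_reverse, pvLeadFalse, if_true]
        congr 1
        push_cast; ring
    | false =>
      simp only [pvGoB, Bool.false_eq_true, if_false]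
      rw [ih (i0 + 1) mn mx (by omega)]
      simp only [List.any_cons, id, Bool.false_or, pvLastT, List.reverse_cons, pvLeadFalse_append,
        List.length_cons, List.length_reverse, List.any_reverse]
      by_cases hr : r.any id = true
      · simp only [hr, if_true]
        congr 1
        push_cast; ring
      · simp [hr]

theorem pvGoB_big : ∀ (bs : List Bool) (i0 mn mx : Int), i0 + bs.length ≤ mn →
    pvGoB bs i0 (mn, mx) = if bs.any id then (i0 + pvLeadFalse bs, i0 + pvLastT bs) else (mn, mx) := by
  intro bs
  induction bs with
  | nil => intro i0 mn mx h; simp [pvGoB]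
  | cons b r ih =>
    intro i0 mn mx h
    simp only [List.length_cons] at h
    cases b with
    | true =>
      have hlt : i0 < mn := by push_cast at h; omega
      simp only [pvGoB, if_true, hlt, if_true]
      rw [pvGoB_after r (i0 + 1) i0 i0 (by omega)]
      simp only [List.any_cons, id, Bool.true_or, if_true, pvLeadFalse, pvLastT,
        List.reverse_cons, pvLeadFalse_append, List.length_cons, List.length_reverse,
        List.any_reverse]
      by_cases hr : r.any id = true
      · simp only [hr, if_true, Prod.mk.injEq]
        refine ⟨by omega, by push_cast; ring⟩
      · have h2 := pvLeadFalse_all_false r.reverse (by simpa using hr)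
        simp only [hr, h2, List.length_reverse, pvLeadFalse, if_true, Prod.mk.injEq]
        refine ⟨by omega, by push_cast; ring⟩
    | false =>
      simp only [pvGoB, Bool.false_eq_true, if_false]
      rw [ih (i0 + 1) mn mx (by push_cast at h ⊢; omega)]
      simp only [List.any_cons, id, Bool.false_or, pvLeadFalse, pvLastT, List.reverse_cons,
        pvLeadFalse_append, List.length_cons, List.length_reverse, List.any_reverse,
        Bool.false_eq_true, if_false]
      by_cases hr : r.any id = true
      · simp only [hr, if_true, Prod.mk.injEq]
        refine ⟨by push_cast; ring, by push_cast; ring⟩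
      · simp [hr]

theorem pvBridgeB (f : Int → Bool) : ∀ (n : Nat) (a : Int) (st : Int × Int),
    (PySem.List.pyRange a (a + n) 1).foldl
      (fun st x => if f x then (if x < st.1 then x else st.1, x) else st) st =
    pvGoB ((PySem.List.pyRange a (a + n) 1).map f) a st := by
  intro n
  induction n with
  | zero =>
    intro a st
    rw [PySem.List.pyRange_one_eq_nil (by omega : a + ((0:Nat):Int) ≤ a)]
    rfl
  | succ m ih =>
    intro a st
    rw [PySem.List.pyRange_one_cons (by push_cast; omega : a < a + (((m + 1 : Nat)):Int))]
    have h : a + (((m + 1 : Nat)):Int) = (a + 1) + ((m : Nat) : Int) := by push_cast; ring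
    simp only [List.foldl_cons, List.map_cons, pvGoB, h, ih]

-- the whole equivalence, parametric in the per-column count c and the per-column test f
theorem pvMain (c : Int → Int) (f : Int → Bool) (w : Nat)
    (hc : ∀ ix : Int, c ix > 0 ↔ f ix = true) :
    (pvLeadFalse ((PySem.List.pyRange 0 (w : Int) 1).foldl
        (fun acc ix => if c ix > 0 then acc ++ [true] else acc ++ [false]) []),
     (w : Int) - pvLeadFalse ((PySem.List.pyRange 0 (w : Int) 1).foldl
        (fun acc ix => if c ix > 0 then acc ++ [true] else acc ++ [false]) []) -
       pvLeadFalse ((PySem.List.pyRange 0 (w : Int) 1).foldl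
        (fun acc ix => if c ix > 0 then acc ++ [true] else acc ++ [false]) []).reverse) =
    (let p := (PySem.List.pyRange 0 (w : Int) 1).foldl
        (fun st x => if f x then (if x < st.1 then x else st.1, x) else st) ((w : Int), -1)
     (p.1, p.2 - p.1 + 1)) := by
  have hbody : ∀ (acc : List Bool) (ix : Int), ix ∈ PySem.List.pyRange 0 (w : Int) 1 →
      (if c ix > 0 then acc ++ [true] else acc ++ [false]) = acc ++ [f ix] := by
    intro acc ix _
    by_cases h : c ix > 0
    · simp [h, (hc ix).mp h]
    · have : f ix = false := by
        cases hfx : f ix with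
        | true => exact absurd ((hc ix).mpr hfx) h
        | false => rfl
      simp [h, this]
  rw [PySem.List.foldl_congr_mem _ _ _ _ hbody, PySem.List.foldl_append_singleton_eq_map, List.nil_append]
  have h0 : (0 : Int) + ((w : Nat) : Int) = (w : Int) := by omega
  have hB := pvBridgeB f w 0 (((w : Nat) : Int), -1)
  rw [h0] at hB
  rw [hB]
  set ts : List Bool := (PySem.List.pyRange 0 (w : Int) 1).map f with hts
  have hlen : (ts.length : Int) = (w : Int) := by
    simp [hts, PySem.List.length_pyRange_one]
  rw [pvGoB_big ts 0 (w : Int) (-1) (by omega)]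
  by_cases hany : ts.any id = true
  · simp only [hany, if_true, pvLastT]
    have h1 := pvLeadFalse_nonneg ts.reverse
    refine Prod.ext (by simp) ?_
    simp only
    omega
  · simp only [hany, Bool.false_eq_true, if_false]
    have h1 := pvLeadFalse_all_false ts (by simpa using hany)
    have h2 := pvLeadFalse_all_false ts.reverse (by simp; simpa using hany)
    refine Prod.ext (by simp [h1, hlen]) ?_
    simp only [h1, h2, List.length_reverse]
    omega

-- per-column equivalence of A's True-count test and B's any() test
theorem pvColumn (grid : List (List Bool)) (ix : Int) :
    (PySem.List.pyRange 0 (grid.length : Int) 1).foldl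
      (fun t iy => if PySem.List.pyGetD (PySem.List.pyGetD grid iy []) ix false then t + 1 else t) (0 : Int) > 0 ↔
    grid.any (fun row => PySem.List.pyGetD row ix false) = true := by
  rw [PySem.List.foldl_pyRange_zero_pyGetD' grid []
      (fun t row => if PySem.List.pyGetD row ix false then t + 1 else t) (0 : Int),
    PySem.List.foldl_if_add_one (fun row => PySem.List.pyGetD row ix false),
    List.any_eq_true, ← List.countP_pos_iff (p := fun row => PySem.List.pyGetD row ix false)]
  omega

-- ===== VERDICT (by name: the statement is the Claim_ definition above) =====
theorem get_piece_spacing_spec : Claim_equal_get_piece_spacing := by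
  intro grid _ _
  show get_piece_spacing grid = get_piece_spacing_alt grid
  unfold get_piece_spacing get_piece_spacing_alt
  dsimp only
  refine pvMain
    (fun ix => (PySem.List.pyRange 0 (grid.length : Int) 1).foldl
      (fun t iy => if PySem.List.pyGetD (PySem.List.pyGetD grid iy []) ix false then t + 1 else t) 0)
    (fun ix => grid.any (fun row => PySem.List.pyGetD row ix false))
    (PySem.List.pyGetD grid 0 []).length ?_
  intro ix
  exact pvColumn grid ix
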